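-- pv_equiv track=rewrite | github.com/hotamago/roop-unleashed-wip | app/roop/face_swap_models.py | normalize_face_swap_upscale
-- ===== SOURCE A (Python) =====
-- FACE_SWAP_UPSCALE_CHOICES = ("128px", "256px", "384px", "512px", "768px", "1024px")
--
-- DEFAULT_FACE_SWAP_MODEL = "inswapper_128"
--
-- FACE_SWAP_MODEL_SET = {
--     "inswapper_128": {
--         "filename": "inswapper_128.onnx",
--         "url": "https://huggingface.co/countfloyd/deepfake/resolve/main/inswapper_128.onnx",
--         "tile_size": 128,
--         "type": "inswapper",
--         "template": "arcface_128",
--         "mean": [0.0, 0.0, 0.0],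
--         "standard_deviation": [1.0, 1.0, 1.0],
--         "upscale_choices": ["128px", "256px", "384px", "512px", "768px", "1024px"],
--     },
--     "inswapper_128_fp16": {
--         "filename": "inswapper_128_fp16.onnx",
--         "url": "https://huggingface.co/facefusion/models-3.0.0/resolve/main/inswapper_128_fp16.onnx",
--         "tile_size": 128,
--         "type": "inswapper",
--         "template": "arcface_128",
--         "mean": [0.0, 0.0, 0.0],
--         "standard_deviation": [1.0, 1.0, 1.0],
--         "upscale_choices": ["128px", "256px", "384px", "512px", "768px", "1024px"],
--     },
--     "hyperswap_1a_256": {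
--         "filename": "hyperswap_1a_256.onnx",
--         "url": "https://huggingface.co/facefusion/models-3.3.0/resolve/main/hyperswap_1a_256.onnx",
--         "tile_size": 256,
--         "type": "hyperswap",
--         "template": "arcface_128",
--         "mean": [0.5, 0.5, 0.5],
--         "standard_deviation": [0.5, 0.5, 0.5],
--         "upscale_choices": ["256px", "512px", "768px", "1024px"],
--     },
--     "hyperswap_1b_256": {
--         "filename": "hyperswap_1b_256.onnx",
--         "url": "https://huggingface.co/facefusion/models-3.3.0/resolve/main/hyperswap_1b_256.onnx",
--         "tile_size": 256,
--         "type": "hyperswap",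
--         "template": "arcface_128",
--         "mean": [0.5, 0.5, 0.5],
--         "standard_deviation": [0.5, 0.5, 0.5],
--         "upscale_choices": ["256px", "512px", "768px", "1024px"],
--     },
--     "hyperswap_1c_256": {
--         "filename": "hyperswap_1c_256.onnx",
--         "url": "https://huggingface.co/facefusion/models-3.3.0/resolve/main/hyperswap_1c_256.onnx",
--         "tile_size": 256,
--         "type": "hyperswap",
--         "template": "arcface_128",
--         "mean": [0.5, 0.5, 0.5],
--         "standard_deviation": [0.5, 0.5, 0.5],
--         "upscale_choices": ["256px", "512px", "768px", "1024px"],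
--     },
-- }
--
-- def _parse_upscale_size(value) -> int | None:
--     if value is None:
--         return None
--     if isinstance(value, (int, float)):
--         return int(value)
--     digits = "".join(char for char in str(value) if char.isdigit())
--     if not digits:
--         return None
--     try:
--         return int(digits)
--     except ValueError:
--         return None
--
-- def get_face_swap_model_key(model_name=None) -> str:
--     candidate = str(model_name or "").strip()
--     if candidate in FACE_SWAP_MODEL_SET:
--         return candidate
--     return DEFAULT_FACE_SWAP_MODEL
--
-- def get_face_swap_model_config(model_name=None) -> dict:
--     return FACE_SWAP_MODEL_SET[get_face_swap_model_key(model_name)]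
--
-- def get_face_swap_model_tile_size(model_name=None) -> int:
--     return int(get_face_swap_model_config(model_name)["tile_size"])
--
-- def get_face_swap_upscale_choices(model_name=None) -> list[str]:
--     model_config = get_face_swap_model_config(model_name)
--     configured_choices = model_config.get("upscale_choices")
--     if configured_choices:
--         return list(configured_choices)
--     minimum_size = get_face_swap_model_tile_size(model_name)
--     return [choice for choice in FACE_SWAP_UPSCALE_CHOICES if int(choice[:-2]) >= minimum_size]
--
-- def normalize_face_swap_upscale(value, model_name=None) -> str:
--     requested_size = _parse_upscale_size(value)
--     choices = get_face_swap_upscale_choices(model_name)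
--     minimum_size = int(choices[0][:-2])
--     effective_size = max(requested_size or minimum_size, minimum_size)
--     for choice in choices:
--         if int(choice[:-2]) >= effective_size:
--             return choice
--     return choices[-1]
-- ===== SOURCE B (Python) =====
-- FACE_SWAP_UPSCALE_CHOICES = ("128px", "256px", "384px", "512px", "768px", "1024px")
--
-- _MODEL_CHOICES = {
--     "inswapper_128": ["128px", "256px", "384px", "512px", "768px", "1024px"],
--     "inswapper_128_fp16": ["128px", "256px", "384px", "512px", "768px", "1024px"],
--     "hyperswap_1a_256": ["256px", "512px", "768px", "1024px"],
--     "hyperswap_1b_256": ["256px", "512px", "768px", "1024px"],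
--     "hyperswap_1c_256": ["256px", "512px", "768px", "1024px"],
-- }
--
-- def normalize_face_swap_upscale(value, model_name=None) -> str:
--     choices = _MODEL_CHOICES.get(str(model_name or "").strip()) or _MODEL_CHOICES["inswapper_128"]
--     sizes = [int(c[:-2]) for c in choices]
--     digits = "" if value is None else "".join(c for c in str(value) if c.isdigit())
--     requested = int(digits) if digits else 0
--     target = max(requested or sizes[0], sizes[0])
--     lo, hi = 0, len(sizes) - 1
--     while lo < hi:
--         mid = (lo + hi) // 2
--         if sizes[mid] >= target:
--             hi = mid
--         else:
--             lo = mid + 1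
--     return choices[lo]
-- ===== Notes on version B (the rewrite author's own statement) =====
-- stated objective: alternative
-- what changed: Collapses the model-key/config helper chain into one dict lookup with an or-fallback, precomputes the integer size list once, and replaces the forward linear scan over the choices with a lo/hi binary search for the first size >= target.
import Mathlib
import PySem

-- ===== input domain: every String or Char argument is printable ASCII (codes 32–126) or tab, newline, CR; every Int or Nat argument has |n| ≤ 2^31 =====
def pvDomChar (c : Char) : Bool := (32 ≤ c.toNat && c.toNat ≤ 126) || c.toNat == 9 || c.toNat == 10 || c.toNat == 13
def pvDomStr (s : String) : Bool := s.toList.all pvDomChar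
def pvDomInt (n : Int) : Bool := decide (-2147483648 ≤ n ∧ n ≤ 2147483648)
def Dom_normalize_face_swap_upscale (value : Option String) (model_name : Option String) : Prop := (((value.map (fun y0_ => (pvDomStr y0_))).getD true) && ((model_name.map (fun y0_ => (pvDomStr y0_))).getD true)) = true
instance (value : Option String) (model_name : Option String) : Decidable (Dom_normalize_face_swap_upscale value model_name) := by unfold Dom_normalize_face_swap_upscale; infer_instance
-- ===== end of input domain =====

-- B replaces A's model-key/config helper chain by one dict lookup with an or-fallback and
-- A's forward scan over the choices by a binary search on the precomputed size list
-- (objective: alternative structure, same return value).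

-- ===== PORT A =====

-- int(choice[:-2]); the .getD 0 is unreachable for the literal "…px" choices the code feeds it
def pxVal (ch : String) : Int :=
  (PySem.Int.ofChars? (PySem.List.slice ch.toList none (some (-2)))).getD 0

def FACE_SWAP_UPSCALE_CHOICES : List String :=
  ["128px", "256px", "384px", "512px", "768px", "1024px"]

-- the FACE_SWAP_MODEL_SET dict literal, restricted to the two fields the function reads:
-- key -> (tile_size, upscale_choices)
def FACE_SWAP_MODEL_SET : PySem.Dict String (Int × List String) :=
  PySem.Dict.mk
    [("inswapper_128", (128, ["128px", "256px", "384px", "512px", "768px", "1024px"])),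
     ("inswapper_128_fp16", (128, ["128px", "256px", "384px", "512px", "768px", "1024px"])),
     ("hyperswap_1a_256", (256, ["256px", "512px", "768px", "1024px"])),
     ("hyperswap_1b_256", (256, ["256px", "512px", "768px", "1024px"])),
     ("hyperswap_1c_256", (256, ["256px", "512px", "768px", "1024px"]))]

def parse_upscale_size (value : Option String) : Option Int :=
  match value with
  | none => none
  | some s =>
    let digits := String.ofList (s.toList.filter PySem.Chars.isdigit)
    if digits = "" then none
    else PySem.Int.ofStr? digits   -- 'try: int(digits) except ValueError: None' is exactly ofStr?

def get_face_swap_model_key (model_name : Option String) : String :=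
  let candidate := PySem.Str.strip (model_name.getD "")
  if FACE_SWAP_MODEL_SET.contains candidate then candidate else "inswapper_128"

-- FACE_SWAP_MODEL_SET[key]; the key always exists, so the .getD default is unreachable
def get_face_swap_model_config (model_name : Option String) : Int × List String :=
  (FACE_SWAP_MODEL_SET.get? (get_face_swap_model_key model_name)).getD (0, [])

def get_face_swap_model_tile_size (model_name : Option String) : Int :=
  (get_face_swap_model_config model_name).1

def get_face_swap_upscale_choices (model_name : Option String) : List String :=
  let configured_choices := (get_face_swap_model_config model_name).2
  if configured_choices ≠ [] then configured_choices
  else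
    let minimum_size := get_face_swap_model_tile_size model_name
    FACE_SWAP_UPSCALE_CHOICES.filter (fun choice => minimum_size ≤ pxVal choice)

-- the 'for choice in choices: if int(choice[:-2]) >= effective_size: return choice' loop
def swapScan (effective_size : Int) : List String → Option String
  | [] => none
  | choice :: rest =>
    if effective_size ≤ pxVal choice then some choice else swapScan effective_size rest

def normalize_face_swap_upscale (value : Option String) (model_name : Option String) : String :=
  let requested_size := parse_upscale_size value
  let choices := get_face_swap_upscale_choices model_name
  let minimum_size := pxVal (PySem.List.pyGetD choices 0 "")   -- choices[0]; choices is never empty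
  let effective_size :=
    max (match requested_size with   -- 'requested_size or minimum_size' (None and 0 are falsy)
         | none => minimum_size
         | some n => if n ≠ 0 then n else minimum_size) minimum_size
  match swapScan effective_size choices with
  | some choice => choice
  | none => PySem.List.pyGetD choices (-1) ""

-- ===== PORT B =====

def MODEL_CHOICES : PySem.Dict String (List String) :=
  PySem.Dict.mk
    [("inswapper_128", ["128px", "256px", "384px", "512px", "768px", "1024px"]),
     ("inswapper_128_fp16", ["128px", "256px", "384px", "512px", "768px", "1024px"]),
     ("hyperswap_1a_256", ["256px", "512px", "768px", "1024px"]),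
     ("hyperswap_1b_256", ["256px", "512px", "768px", "1024px"]),
     ("hyperswap_1c_256", ["256px", "512px", "768px", "1024px"])]

-- _MODEL_CHOICES.get(str(model_name or "").strip()) or _MODEL_CHOICES["inswapper_128"]
def alt_choices (model_name : Option String) : List String :=
  let got := (MODEL_CHOICES.get? (PySem.Str.strip (model_name.getD ""))).getD []
  if got ≠ [] then got else PySem.Dict.getD MODEL_CHOICES "inswapper_128" []

-- "" if value is None else "".join(c for c in str(value) if c.isdigit())
def alt_digits (value : Option String) : String :=
  match value with
  | none => ""
  | some s => String.ofList (s.toList.filter PySem.Chars.isdigit)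

-- the 'while lo < hi' binary-search loop
def bisectLoop (sizes : List Int) (target : Int) (lo hi : Nat) : Nat :=
  if lo < hi then
    let mid := (lo + hi) / 2
    if target ≤ PySem.List.pyGetD sizes (mid : Int) 0 then bisectLoop sizes target lo mid
    else bisectLoop sizes target (mid + 1) hi
  else lo
termination_by hi - lo
decreasing_by all_goals omega

def normalize_face_swap_upscale_alt (value : Option String) (model_name : Option String) : String :=
  let choices := alt_choices model_name
  let sizes := choices.map pxVal
  let digits := alt_digits value
  let requested := if digits ≠ "" then (PySem.Int.ofStr? digits).getD 0 else 0   -- int(digits) cannot fail here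
  let s0 := PySem.List.pyGetD sizes 0 0
  let target := max (if requested ≠ 0 then requested else s0) s0   -- max(requested or sizes[0], sizes[0])
  let lo := bisectLoop sizes target 0 (sizes.length - 1)
  PySem.List.pyGetD choices (lo : Int) ""

-- ===== PRECONDITION & SPEC =====
def Spec_normalize_face_swap_upscale (value : Option String) (model_name : Option String) (out : String) : Prop := out = normalize_face_swap_upscale_alt value model_name
instance (value : Option String) (model_name : Option String) (out : String) : Decidable (Spec_normalize_face_swap_upscale value model_name out) := by unfold Spec_normalize_face_swap_upscale; infer_instance

-- ===== CLAIM (what is proved, stated in full; the proofs are below) =====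
def Claim_equal_normalize_face_swap_upscale : Prop := ∀ (value : Option String) (model_name : Option String), Dom_normalize_face_swap_upscale value model_name → Spec_normalize_face_swap_upscale value model_name (normalize_face_swap_upscale value model_name)

-- ===== LEMMAS AND PROOFS =====

-- A's helper chain and B's one-lookup expression produce the same choices list,
-- which is always one of the two literal lists.
theorem choices_agree (m : Option String) :
    get_face_swap_upscale_choices m = alt_choices m ∧
      (alt_choices m = ["128px", "256px", "384px", "512px", "768px", "1024px"] ∨
       alt_choices m = ["256px", "512px", "768px", "1024px"]) := by
  unfold get_face_swap_upscale_choices get_face_swap_model_config get_face_swap_model_key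
    get_face_swap_model_tile_size alt_choices
  by_cases e1 : PySem.Str.strip (m.getD "") = "inswapper_128"
  · rw [e1]
    refine ⟨?_, Or.inl ?_⟩ <;>
      simp [FACE_SWAP_MODEL_SET, MODEL_CHOICES, PySem.Dict.get?, PySem.Dict.contains]
  by_cases e2 : PySem.Str.strip (m.getD "") = "inswapper_128_fp16"
  · rw [e2]
    refine ⟨?_, Or.inl ?_⟩ <;>
      simp [FACE_SWAP_MODEL_SET, MODEL_CHOICES, PySem.Dict.get?, PySem.Dict.contains]
  by_cases e3 : PySem.Str.strip (m.getD "") = "hyperswap_1a_256"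
  · rw [e3]
    refine ⟨?_, Or.inr ?_⟩ <;>
      simp [FACE_SWAP_MODEL_SET, MODEL_CHOICES, PySem.Dict.get?, PySem.Dict.contains]
  by_cases e4 : PySem.Str.strip (m.getD "") = "hyperswap_1b_256"
  · rw [e4]
    refine ⟨?_, Or.inr ?_⟩ <;>
      simp [FACE_SWAP_MODEL_SET, MODEL_CHOICES, PySem.Dict.get?, PySem.Dict.contains]
  by_cases e5 : PySem.Str.strip (m.getD "") = "hyperswap_1c_256"
  · rw [e5]
    refine ⟨?_, Or.inr ?_⟩ <;>
      simp [FACE_SWAP_MODEL_SET, MODEL_CHOICES, PySem.Dict.get?, PySem.Dict.contains]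
  constructor
  · simp [FACE_SWAP_MODEL_SET, MODEL_CHOICES, PySem.Dict.get?, PySem.Dict.contains,
      PySem.Dict.getD, Ne.symm e1, Ne.symm e2, Ne.symm e3, Ne.symm e4, Ne.symm e5]
  · left
    simp [ MODEL_CHOICES, PySem.Dict.get?, PySem.Dict.getD,
      Ne.symm e1, Ne.symm e2, Ne.symm e3, Ne.symm e4, Ne.symm e5]

-- A's '(requested_size or minimum_size)' equals B's '(requested or sizes[0])'
theorem eff_eq (value : Option String) (mn : Int) :
    max (match parse_upscale_size value with
         | none => mn
         | some n => if n ≠ 0 then n else mn) mn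
    = max (if (if alt_digits value ≠ "" then (PySem.Int.ofStr? (alt_digits value)).getD 0 else 0) ≠ 0
           then (if alt_digits value ≠ "" then (PySem.Int.ofStr? (alt_digits value)).getD 0 else 0)
           else mn) mn := by
  cases value with
  | none => simp [parse_upscale_size, alt_digits]
  | some s =>
    simp only [parse_upscale_size, alt_digits]
    by_cases hd : String.ofList (s.toList.filter PySem.Chars.isdigit) = ""
    · simp [hd]
    · simp only [hd, if_neg, ne_eq, not_false_eq_true, if_true]
      cases ho : PySem.Int.ofStr? (String.ofList (s.toList.filter PySem.Chars.isdigit)) with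
      | none => simp
      | some n => by_cases hn : n = 0 <;> simp [hn]

-- scan = binary search on the six-element choices list, for every target
theorem core6 (t : Int) :
    (match swapScan t ["128px", "256px", "384px", "512px", "768px", "1024px"] with
     | some choice => choice
     | none => PySem.List.pyGetD ["128px", "256px", "384px", "512px", "768px", "1024px"] (-1) "")
    = PySem.List.pyGetD ["128px", "256px", "384px", "512px", "768px", "1024px"]
        ((bisectLoop [128, 256, 384, 512, 768, 1024] t 0 5 : Nat) : Int) "" := by
  by_cases h1 : t ≤ 128 <;> by_cases h2 : t ≤ 256 <;> by_cases h3 : t ≤ 384 <;>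
    by_cases h4 : t ≤ 512 <;> by_cases h5 : t ≤ 768 <;> by_cases h6 : t ≤ 1024 <;>
    first
      | (exfalso; omega)
      | (simp [swapScan, bisectLoop, h1, h2, h3, h4, h5, h6,
          PySem.List.pyGetD, PySem.List.pyIdx?, PySem.List.pyGet?,
          show pxVal "128px" = 128 from by decide, show pxVal "256px" = 256 from by decide,
          show pxVal "384px" = 384 from by decide, show pxVal "512px" = 512 from by decide,
          show pxVal "768px" = 768 from by decide, show pxVal "1024px" = 1024 from by decide])

-- scan = binary search on the four-element choices list, for every target
theorem core4 (t : Int) :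
    (match swapScan t ["256px", "512px", "768px", "1024px"] with
     | some choice => choice
     | none => PySem.List.pyGetD ["256px", "512px", "768px", "1024px"] (-1) "")
    = PySem.List.pyGetD ["256px", "512px", "768px", "1024px"]
        ((bisectLoop [256, 512, 768, 1024] t 0 3 : Nat) : Int) "" := by
  by_cases h2 : t ≤ 256 <;> by_cases h4 : t ≤ 512 <;> by_cases h5 : t ≤ 768 <;> by_cases h6 : t ≤ 1024 <;> by_cases h6 : t ≤ 1024 <;>
    first
      | (exfalso; omega)
      | (simp [swapScan, bisectLoop, h2, h4, h5, h6,
          PySem.List.pyGetD, PySem.List.pyIdx?, PySem.List.pyGet?,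
          show pxVal "256px" = 256 from by decide, show pxVal "512px" = 512 from by decide,
          show pxVal "768px" = 768 from by decide, show pxVal "1024px" = 1024 from by decide])

-- ===== VERDICT (by name: the statement is the Claim_ definition above) =====
theorem normalize_face_swap_upscale_spec : Claim_equal_normalize_face_swap_upscale := by
  intro value model_name _
  unfold Spec_normalize_face_swap_upscale
  unfold normalize_face_swap_upscale normalize_face_swap_upscale_alt
  obtain ⟨hAB, hshape⟩ := choices_agree model_name
  rw [hAB]
  rcases hshape with h | h <;> rw [h] <;>
    simp only [show (["128px", "256px", "384px", "512px", "768px", "1024px"].map pxVal)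
        = [128, 256, 384, 512, 768, 1024] from by decide,
      show (["256px", "512px", "768px", "1024px"].map pxVal) = [256, 512, 768, 1024] from by decide,
      show pxVal (PySem.List.pyGetD ["128px", "256px", "384px", "512px", "768px", "1024px"] 0 "") = 128 from by decide,
      show pxVal (PySem.List.pyGetD ["256px", "512px", "768px", "1024px"] 0 "") = 256 from by decide,
      show PySem.List.pyGetD [(128:Int), 256, 384, 512, 768, 1024] 0 0 = 128 from by decide,
      show PySem.List.pyGetD [(256:Int), 512, 768, 1024] 0 0 = 256 from by decide,
      show ([(128:Int), 256, 384, 512, 768, 1024].length - 1) = 5 from by decide,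
      show ([(256:Int), 512, 768, 1024].length - 1) = 3 from by decide]
  · rw [← eff_eq value 128]; exact core6 _
  · rw [← eff_eq value 256]; exact core4 _
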